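-- pv_equiv track=rewrite | github.com/pypi-data/pypi-mirror-225 | packages/osm4gpd/osm4gpd-0.2.0a0.tar.gz/osm4gpd-0.2.0a0/osm4gpd/tags.py | parse_dense_tags
-- ===== SOURCE A (Python) =====
-- from typing import Generator, Sequence
--
-- def parse_dense_tags(
--     keys_vals: Sequence[int], string_table: list[str]
-- ) -> Generator[tuple[int, dict[str, str]], None, None]:
--     node_idx = 0
--     kv_idx = 0
--
--     while kv_idx < len(keys_vals):
--         tags = dict()
--         while keys_vals[kv_idx] != 0:
--             k = keys_vals[kv_idx]
--             v = keys_vals[kv_idx + 1]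
--             kv_idx += 2
--             tags[string_table[k]] = string_table[v]
--
--         if len(tags) > 0:
--             yield node_idx, tags
--
--         kv_idx += 1
--         node_idx += 1
-- ===== SOURCE B (Python) =====
-- from typing import Generator, Sequence
--
-- def parse_dense_tags(
--     keys_vals: Sequence[int], string_table: list[str]
-- ) -> Generator[tuple[int, dict[str, str]], None, None]:
--     # Phase 1: split the stream into segments, one per group.  A group's
--     # terminator is the first 0 at a key position, found by stepping two
--     # past each key/value pair.
--     segments = []
--     i = 0
--     n = len(keys_vals)
--     while i < n:
--         j = i
--         while keys_vals[j] != 0: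
--             j += 2
--         segments.append(keys_vals[i:j])
--         i = j + 1
--     # Phase 2: build each segment's tag dict at once by zipping its
--     # even-position keys with its odd-position values.
--     for node_idx, seg in enumerate(segments):
--         tags = {string_table[k]: string_table[v]
--                 for k, v in zip(seg[0::2], seg[1::2])}
--         if tags:
--             yield node_idx, tags
-- ===== Notes on version B (the rewrite author's own statement) =====
-- stated objective: alternative
-- what changed: Replaces A's interleaved nested while-loops (mutating one dict entry at a time while scanning) by a two-phase decomposition: one pass splits the stream into one segment per group, then each segment's dict is built at once by zipping its even- and odd-position entries; Pre_ excludes exactly the malformed streams (unterminated final group, key without value, or string-table index out of range) on which A raises IndexError, and B's indexing raises there too.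
import Mathlib
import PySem

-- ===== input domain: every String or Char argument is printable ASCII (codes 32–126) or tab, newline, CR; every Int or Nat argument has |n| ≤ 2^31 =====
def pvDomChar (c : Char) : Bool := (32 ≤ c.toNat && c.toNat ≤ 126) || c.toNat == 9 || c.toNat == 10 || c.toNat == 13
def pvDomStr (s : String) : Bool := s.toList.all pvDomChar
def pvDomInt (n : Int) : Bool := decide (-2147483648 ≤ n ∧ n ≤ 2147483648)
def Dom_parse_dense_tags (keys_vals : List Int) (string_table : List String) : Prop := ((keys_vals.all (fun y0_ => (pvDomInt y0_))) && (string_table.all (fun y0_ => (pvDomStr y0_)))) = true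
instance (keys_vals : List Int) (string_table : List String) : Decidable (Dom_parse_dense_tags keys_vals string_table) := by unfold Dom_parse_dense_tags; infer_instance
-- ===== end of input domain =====

-- B replaces the interleaved per-element dict mutation by a two-phase pass (split the
-- stream into one segment per group, then build each dict at once by zipping even/odd
-- positions); equivalence is over the return value (A is a generator, read out as a
-- list), on the well-formed streams Pre_ admits.

-- ===== PORT A =====
-- Inner while-loop of A: reads key/value pairs until a 0 key.  The dif guards mark
-- exactly where Python's list indexing would raise IndexError (excluded by
-- Pre_parse_dense_tags); fuel only makes the loop total and never runs out at the
-- fuel passed by pvOuterA (each iteration moves kv_idx forward).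
def pvInnerA (keys_vals : List Int) (string_table : List String) :
    Nat → Nat → PySem.Dict String String → PySem.Dict String String × Nat
  | 0, kv_idx, tags => (tags, kv_idx)
  | fuel + 1, kv_idx, tags =>
    if hin : kv_idx < keys_vals.length then
      let k := keys_vals[kv_idx]
      if k = 0 then (tags, kv_idx)
      else if hv : kv_idx + 1 < keys_vals.length then
        let v := keys_vals[kv_idx + 1]
        pvInnerA keys_vals string_table fuel (kv_idx + 2)
          (tags.insert ((PySem.List.pyGet? string_table k).getD "")
                       ((PySem.List.pyGet? string_table v).getD ""))
      else (tags, kv_idx)   -- Python: IndexError (value read past the end)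
    else (tags, kv_idx)     -- Python: IndexError (key read past the end)

-- Outer while-loop of A: one iteration per group; yields are collected in an accumulator.
def pvOuterA (keys_vals : List Int) (string_table : List String) :
    Nat → Nat → Int → List (Int × List (String × String)) →
    List (Int × List (String × String))
  | 0, _, _, acc => acc
  | fuel + 1, kv_idx, node_idx, acc =>
    if h : kv_idx < keys_vals.length then
      let r := pvInnerA keys_vals string_table (keys_vals.length + 1) kv_idx
        PySem.Dict.empty
      pvOuterA keys_vals string_table fuel (r.2 + 1) (node_idx + 1)
        (if r.1.size > 0 then acc ++ [(node_idx, r.1.items)] else acc)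
    else acc

def parse_dense_tags (keys_vals : List Int) (string_table : List String) :
    List (Int × (List (String × String))) :=
  pvOuterA keys_vals string_table (keys_vals.length + 1) 0 0 []

-- ===== PORT B =====
-- Inner while-loop of B's phase 1: find the terminator of the group starting at i
-- by stepping two past each pair.  The dif guard marks where Python's keys_vals[j]
-- would raise IndexError (excluded by Pre_parse_dense_tags); fuel only makes the
-- loop total and never runs out at the fuel passed below.
def pvFindB (keys_vals : List Int) : Nat → Nat → Nat
  | 0, j => j
  | fuel + 1, j =>
    if h : j < keys_vals.length then
      if keys_vals[j] = 0 then j else pvFindB keys_vals fuel (j + 2)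
    else j   -- Python: IndexError (unterminated group / key without value)

-- Phase 1 of B: split the stream into one segment per group.
def pvSegsB (keys_vals : List Int) : Nat → Nat → List (List Int)
  | 0, _ => []
  | fuel + 1, i =>
    if i < keys_vals.length then
      let j := pvFindB keys_vals (keys_vals.length + 1) i
      PySem.List.slice keys_vals (some (i : Int)) (some (j : Int)) ::
        pvSegsB keys_vals fuel (j + 1)
    else []

-- B's dict comprehension over zip(seg[0::2], seg[1::2]); string_table indexing is
-- made total via getD "" — Python raises there, excluded by Pre_parse_dense_tags.
def pvSegDictB (string_table : List String) (seg : List Int) :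
    PySem.Dict String String :=
  (List.zip ((PySem.List.slice? seg (some 0) none 2).getD [])
            ((PySem.List.slice? seg (some 1) none 2).getD [])).foldl
    (fun d p =>
      d.insert ((PySem.List.pyGet? string_table p.1).getD "")
               ((PySem.List.pyGet? string_table p.2).getD "")) PySem.Dict.empty

-- Phase 2 of B: for node_idx, seg in enumerate(segments).
def pvEmitB (string_table : List String) :
    List (List Int) → Int → List (Int × List (String × String)) →
    List (Int × List (String × String))
  | [], _, acc => acc
  | seg :: segs, node_idx, acc =>
    let tags := pvSegDictB string_table seg
    pvEmitB string_table segs (node_idx + 1)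
      (if tags.size > 0 then acc ++ [(node_idx, tags.items)] else acc)

def parse_dense_tags_alt (keys_vals : List Int) (string_table : List String) :
    List (Int × (List (String × String))) :=
  pvEmitB string_table (pvSegsB keys_vals (keys_vals.length + 1) 0) 0 []

-- ===== PRECONDITION & SPEC =====
def pvInRange (L : Nat) (x : Int) : Bool :=
  decide (-(L : Int) ≤ x) && decide (x < (L : Int))

-- grammar of well-formed dense-tag streams: groups of (key ≠ 0, value) pairs, each
-- key/value a valid Python index into string_table, each group closed by a 0
def pvOkG (L : Nat) : List Int → Bool
  | [] => false
  | k :: rest =>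
    if k = 0 then (rest.isEmpty || pvOkG L rest)
    else
      match rest with
      | [] => false
      | v :: rest' => pvInRange L k && pvInRange L v && pvOkG L rest'

-- Pre_ excludes exactly the streams on which A raises IndexError: an unterminated
-- final group, a key missing its value, or a key/value index out of range for
-- string_table.
def Pre_parse_dense_tags (keys_vals : List Int) (string_table : List String) : Prop :=
  keys_vals = [] ∨ pvOkG string_table.length keys_vals = true

instance (keys_vals : List Int) (string_table : List String) :
    Decidable (Pre_parse_dense_tags keys_vals string_table) := by
  unfold Pre_parse_dense_tags; infer_instance

def pvWitness_parse_dense_tags : List Int × List String :=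
  ([1, 2, 0, 0, 2, 1, 0], ["x", "a", "b"])

def Spec_parse_dense_tags (keys_vals : List Int) (string_table : List String) (out : List (Int × (List (String × String)))) : Prop := out = parse_dense_tags_alt keys_vals string_table
instance (keys_vals : List Int) (string_table : List String) (out : List (Int × (List (String × String)))) : Decidable (Spec_parse_dense_tags keys_vals string_table out) := by unfold Spec_parse_dense_tags; infer_instance

-- ===== CLAIM (what is proved, stated in full; the proofs are below) =====
def Claim_equal_parse_dense_tags : Prop := ∀ (keys_vals : List Int) (string_table : List String), Dom_parse_dense_tags keys_vals string_table → Pre_parse_dense_tags keys_vals string_table → Spec_parse_dense_tags keys_vals string_table (parse_dense_tags keys_vals string_table)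

-- ===== LEMMAS AND PROOFS =====

-- two-step list induction used for pair-shaped segments
lemma pvTwoStep (P : List Int → Prop) (h0 : P []) (h1 : ∀ x, P [x])
    (h2 : ∀ x y r, P r → P (x :: y :: r)) : ∀ l, P l := by
  have key : ∀ n (l : List Int), l.length ≤ n → P l := by
    intro n
    induction n with
    | zero =>
      intro l hl
      cases l with
      | nil => exact h0
      | cons x t => simp at hl
    | succ n ih =>
      intro l hl
      match l with
      | [] => exact h0
      | [x] => exact h1 x
      | x :: y :: r =>
        exact h2 x y r (ih r (by simp at hl; omega))
  exact fun l => key l.length l le_rfl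

-- a run of in-range (key ≠ 0, value) pairs
def pvPairs (L : Nat) : List Int → Bool
  | [] => true
  | [_] => false
  | k :: v :: r => decide (k ≠ 0) && pvInRange L k && pvInRange L v && pvPairs L r

-- the dict produced by inserting the pairs of a segment in order
def pvDictUpd (string_table : List String) (d : PySem.Dict String String) :
    List Int → PySem.Dict String String
  | [] => d
  | [_] => d
  | k :: v :: r =>
    pvDictUpd string_table
      (d.insert ((PySem.List.pyGet? string_table k).getD "")
                ((PySem.List.pyGet? string_table v).getD "")) r

-- every well-formed stream starts with a pair run closed by a 0
lemma pvSplit (L : Nat) :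
    ∀ t : List Int, pvOkG L t = true →
      ∃ seg rest, t = seg ++ 0 :: rest ∧ pvPairs L seg = true ∧
        (rest = [] ∨ pvOkG L rest = true) := by
  have key : ∀ n (t : List Int), t.length ≤ n → pvOkG L t = true →
      ∃ seg rest, t = seg ++ 0 :: rest ∧ pvPairs L seg = true ∧
        (rest = [] ∨ pvOkG L rest = true) := by
    intro n
    induction n with
    | zero =>
      intro t ht h
      match t, ht, h with
      | [], _, h => simp [pvOkG] at h
      | x :: r, ht, _ => simp only [List.length_cons] at ht; omega
    | succ n ih =>
      intro t ht h
      match t, ht, h with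
      | [], _, h => simp [pvOkG] at h
      | [k], _, h =>
        by_cases hk : k = 0
        · subst hk
          exact ⟨[], [], by simp, by simp [pvPairs], Or.inl rfl⟩
        · simp [pvOkG, hk] at h
      | k :: v :: rest', ht, h =>
        by_cases hk : k = 0
        · subst hk
          simp [pvOkG] at h
          exact ⟨[], v :: rest', by simp, by simp [pvPairs], Or.inr h⟩
        · simp [pvOkG, hk] at h
          obtain ⟨⟨hk1, hv1⟩, hrec⟩ := h
          obtain ⟨seg', rest'', heq, hp, hr⟩ :=
            ih rest' (by simp only [List.length_cons] at ht; omega) hrec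
          exact ⟨k :: v :: seg', rest'', by simp [heq],
            by simp [pvPairs, hk, hk1, hv1, hp], hr⟩
  exact fun t => key t.length t le_rfl

lemma pvSliceEvens (l : List Int) (a b : Int) :
    PySem.List.slice? (a :: b :: l) (some 0) none 2 =
      some (a :: (PySem.List.slice? l (some 0) none 2).getD []) := by
  simp only [PySem.List.slice?, PySem.List.sliceIndices]
  norm_num
  have hmin : min (0:Int) (↑l.length + 1 + 1) = 0 := by omega
  have hif : (0:Int) ≤ ↑l.length + 1 := by positivity
  simp only [hmin, if_pos hif, zero_add]
  have hc : ((↑l.length + 1 + 1 - 0 + 2 - 1 : Int) / 2).toNat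
      = ((↑l.length + 2 - 1 : Int) / 2).toNat + 1 := by omega
  have hr : (if 0 < l.length then ((↑l.length + 2 - 1 : Int) / 2).toNat else 0)
      = ((↑l.length + 2 - 1 : Int) / 2).toNat := by split <;> omega
  simp only [hc, hr]
  rw [List.range_succ_eq_map]
  simp [List.filterMap_map]
  congr 1

lemma pvSliceOdds (l : List Int) (a b : Int) :
    PySem.List.slice? (a :: b :: l) (some 1) none 2 =
      some (b :: (PySem.List.slice? l (some 1) none 2).getD []) := by
  by_cases hl : l = []
  · subst hl
    simp [PySem.List.slice?, PySem.List.sliceIndices]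
  · have hn : 0 < l.length := List.length_pos_iff.mpr hl
    simp only [PySem.List.slice?, PySem.List.sliceIndices]
    norm_num
    have hmin1 : min (1:Int) (↑l.length + 1 + 1) = 1 := by omega
    have hmin2 : min (1:Int) (↑l.length) = 1 := by omega
    simp only [hmin1, hmin2]
    have hc : ((↑l.length + 1 + 1 - 1 + 2 - 1 : Int) / 2).toNat
      = ((↑l.length - 1 + 2 - 1 : Int) / 2).toNat + 1 := by omega
    have hr : (if 1 < l.length then ((↑l.length - 1 + 2 - 1 : Int) / 2).toNat else 0)
      = ((↑l.length - 1 + 2 - 1 : Int) / 2).toNat := by split <;> omega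
    simp only [hc, hr]
    rw [List.range_succ_eq_map]
    simp [List.filterMap_map]
    congr 1

lemma pvSliceEvensNil : PySem.List.slice? ([] : List Int) (some 0) none 2 = some [] := by
  decide

lemma pvSliceOddsNil : PySem.List.slice? ([] : List Int) (some 1) none 2 = some [] := by
  decide

lemma pvSliceOddsOne (x : Int) :
    PySem.List.slice? [x] (some 1) none 2 = some [] := by
  simp [PySem.List.slice?, PySem.List.sliceIndices]

-- B's zipped dict comprehension inserts exactly the pairs of the segment, in order
lemma pvSegDictB_fold (string_table : List String) :
    ∀ seg d,
      (List.zip ((PySem.List.slice? seg (some 0) none 2).getD [])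
                ((PySem.List.slice? seg (some 1) none 2).getD [])).foldl
        (fun d p =>
          d.insert ((PySem.List.pyGet? string_table p.1).getD "")
                   ((PySem.List.pyGet? string_table p.2).getD "")) d =
      pvDictUpd string_table d seg := by
  intro seg
  induction seg using pvTwoStep with
  | h0 => intro d; simp [pvSliceEvensNil, pvSliceOddsNil, pvDictUpd]
  | h1 x => intro d; simp [pvSliceOddsOne, pvDictUpd, List.zip_nil_right]
  | h2 x y r ih =>
    intro d
    rw [pvSliceEvens, pvSliceOdds]
    simp only [Option.getD_some, List.zip_cons_cons, List.foldl_cons]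
    rw [ih]
    simp [pvDictUpd]

lemma pvSegDictB_eq (string_table : List String) (seg : List Int) :
    pvSegDictB string_table seg = pvDictUpd string_table PySem.Dict.empty seg := by
  rw [pvSegDictB]
  exact pvSegDictB_fold string_table seg PySem.Dict.empty

-- A's inner loop consumes exactly the pair run before the terminating 0
lemma pvInnerA_run (kv : List Int) (st : List String) :
    ∀ seg, ∀ fuel i tags rest, kv.drop i = seg ++ 0 :: rest →
      pvPairs st.length seg = true → seg.length < fuel →
      pvInnerA kv st fuel i tags =
        (pvDictUpd st tags seg, i + seg.length) := by
  intro seg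
  induction seg using pvTwoStep with
  | h0 =>
    intro fuel i tags rest hdrop hp hfuel
    simp only [List.nil_append] at hdrop
    have h0 : kv[i]? = some 0 := by
      have := List.getElem?_drop (xs := kv) (i := i) (j := 0)
      rw [hdrop] at this
      simpa using this.symm
    obtain ⟨hlt, hk0⟩ := List.getElem?_eq_some_iff.mp h0
    match fuel, hfuel with
    | fuel + 1, _ =>
      rw [pvInnerA, dif_pos hlt]
      simp [hk0, pvDictUpd]
  | h1 x => intro fuel i tags rest hdrop hp; simp [pvPairs] at hp
  | h2 x y r ih =>
    intro fuel i tags rest hdrop hp hfuel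
    simp only [List.cons_append] at hdrop
    simp only [pvPairs, Bool.and_eq_true, decide_eq_true_eq] at hp
    obtain ⟨⟨⟨hx0, hxr⟩, hyr⟩, hpr⟩ := hp
    have hx : kv[i]? = some x := by
      have := List.getElem?_drop (xs := kv) (i := i) (j := 0)
      rw [hdrop] at this
      simpa using this.symm
    have hy : kv[i + 1]? = some y := by
      have := List.getElem?_drop (xs := kv) (i := i) (j := 1)
      rw [hdrop] at this
      simpa using this.symm
    obtain ⟨hlt, hkx⟩ := List.getElem?_eq_some_iff.mp hx
    obtain ⟨hlt1, hky⟩ := List.getElem?_eq_some_iff.mp hy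
    have hdrop2 : kv.drop (i + 2) = r ++ 0 :: rest := by
      have hd : List.drop 2 (List.drop i kv) = List.drop (i + 2) kv := List.drop_drop
      rw [← hd, hdrop]
      simp
    match fuel, hfuel with
    | fuel + 1, hfuel =>
      have IH := ih fuel (i + 2)
        (tags.insert ((PySem.List.pyGet? st x).getD "")
                     ((PySem.List.pyGet? st y).getD "")) rest hdrop2 hpr
        (by simp only [List.length_cons] at hfuel; omega)
      rw [pvInnerA, dif_pos hlt]
      simp only [hkx, hky, if_neg hx0, dif_pos hlt1]
      rw [IH]
      simp only [pvDictUpd, List.length_cons]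
      have e : i + 2 + r.length = i + (r.length + 1 + 1) := by omega
      rw [e]

lemma pvFindB_ge (kv : List Int) :
    ∀ fuel j, j ≤ pvFindB kv fuel j := by
  intro fuel
  induction fuel with
  | zero => intro j; simp [pvFindB]
  | succ fuel ih =>
    intro j
    rw [pvFindB]
    split
    · split
      · exact le_refl j
      · exact le_trans (by omega) (ih (j + 2))
    · exact le_refl j

-- phase 1's terminator search finds exactly the 0 closing the current pair run
lemma pvFindB_run (kv : List Int) (L : Nat) :
    ∀ seg, ∀ i rest fuel, kv.drop i = seg ++ 0 :: rest →
      pvPairs L seg = true → seg.length < fuel →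
      pvFindB kv fuel i = i + seg.length := by
  intro seg
  induction seg using pvTwoStep with
  | h0 =>
    intro i rest fuel hdrop hp hfuel
    simp only [List.nil_append] at hdrop
    have h0 : kv[i]? = some 0 := by
      have := List.getElem?_drop (xs := kv) (i := i) (j := 0)
      rw [hdrop] at this
      simpa using this.symm
    obtain ⟨hlt, hk0⟩ := List.getElem?_eq_some_iff.mp h0
    match fuel, hfuel with
    | fuel + 1, _ =>
      rw [pvFindB, dif_pos hlt, if_pos hk0]
      simp
  | h1 x => intro i rest fuel hdrop hp; simp [pvPairs] at hp
  | h2 x y r ih =>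
    intro i rest fuel hdrop hp hfuel
    simp only [List.cons_append] at hdrop
    simp only [pvPairs, Bool.and_eq_true, decide_eq_true_eq] at hp
    obtain ⟨⟨⟨hx0, _⟩, _⟩, hpr⟩ := hp
    have hx : kv[i]? = some x := by
      have := List.getElem?_drop (xs := kv) (i := i) (j := 0)
      rw [hdrop] at this
      simpa using this.symm
    obtain ⟨hlt, hkx⟩ := List.getElem?_eq_some_iff.mp hx
    have hdrop2 : kv.drop (i + 2) = r ++ 0 :: rest := by
      have hd : List.drop 2 (List.drop i kv) = List.drop (i + 2) kv := List.drop_drop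
      rw [← hd, hdrop]
      simp
    match fuel, hfuel with
    | fuel + 1, hfuel =>
      rw [pvFindB, dif_pos hlt, if_neg (by rw [hkx]; exact hx0)]
      rw [ih (i + 2) rest fuel hdrop2 hpr
        (by simp only [List.length_cons] at hfuel; omega)]
      simp only [List.length_cons]
      omega

lemma pvSegsB_nil (kv : List Int) (fuel i : Nat)
    (h : kv.length ≤ i) : pvSegsB kv fuel i = [] := by
  cases fuel with
  | zero => rfl
  | succ fuel => rw [pvSegsB, if_neg (by omega)]

-- the segment scan does not depend on the fuel, as long as there is enough of it
lemma pvSegsB_fuel (kv : List Int) :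
    ∀ n fuel fuel' i, kv.length - i < n →
      kv.length - i < fuel → kv.length - i < fuel' →
      pvSegsB kv fuel i = pvSegsB kv fuel' i := by
  intro n
  induction n with
  | zero => intro fuel fuel' i h; omega
  | succ n ih =>
    intro fuel fuel' i hn hf hf'
    by_cases hi : i < kv.length
    · match fuel, fuel', hf, hf' with
      | fuel + 1, fuel' + 1, hf, hf' =>
        rw [pvSegsB]
        rw [pvSegsB]
        simp only [if_pos hi]
        have hj := pvFindB_ge kv (kv.length + 1) i
        rw [ih fuel fuel' (pvFindB kv (kv.length + 1) i + 1)
          (by omega) (by omega) (by omega)]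
      | 0, _, hf, _ => omega
      | _ + 1, 0, _, hf' => omega
    · rw [pvSegsB_nil kv fuel i (by omega), pvSegsB_nil kv fuel' i (by omega)]

-- phase 1 slices out exactly the current pair run
lemma pvSegsB_run (kv : List Int) (L : Nat)
    (seg : List Int) (i : Nat) (rest : List Int) (fuel : Nat)
    (hdrop : kv.drop i = seg ++ 0 :: rest)
    (hpairs : pvPairs L seg = true) (hfuel : kv.length - i < fuel) :
    pvSegsB kv fuel i = seg :: pvSegsB kv fuel (i + seg.length + 1) := by
  have hlendrop : kv.length - i = seg.length + 1 + rest.length := by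
    have hc := congrArg List.length hdrop
    simp [List.length_drop] at hc
    omega
  have hi : i < kv.length := by omega
  have hfind := pvFindB_run kv L seg i rest (kv.length + 1) hdrop hpairs (by omega)
  have hslice : PySem.List.slice kv (some ((i : Nat) : Int))
      (some (((i + seg.length : Nat)) : Int)) = seg := by
    rw [PySem.List.slice_natCast]
    have he : i + seg.length - i = seg.length := by omega
    rw [he, hdrop]
    exact List.take_left
  match fuel, hfuel with
  | fuel + 1, hfuel =>
    rw [pvSegsB, if_pos hi]
    simp only [hfind, hslice]
    rw [pvSegsB_fuel kv (kv.length - (i + seg.length + 1) + 1)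
      fuel (fuel + 1) (i + seg.length + 1) (by omega) (by omega) (by omega)]

-- the two loop pipelines agree from any well-formed suffix onwards
lemma pvMainLoop (kv : List Int) (st : List String) :
    ∀ (n i : Nat), kv.length - i < n →
      (kv.drop i = [] ∨ pvOkG st.length (kv.drop i) = true) →
      ∀ fuel node acc, kv.length - i < fuel →
        pvOuterA kv st fuel i node acc =
          pvEmitB st (pvSegsB kv (kv.length + 1) i) node acc := by
  intro n
  induction n with
  | zero => intro i h; omega
  | succ n ih =>
    intro i hlen hok fuel node acc hfuel
    rcases hok with hnil | hok
    · have hge : kv.length ≤ i := List.drop_eq_nil_iff.mp hnil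
      match fuel, hfuel with
      | fuel + 1, _ =>
        rw [pvOuterA, dif_neg (by omega),
          pvSegsB_nil kv (kv.length + 1) i hge, pvEmitB]
    · obtain ⟨seg, rest, hsplit, hpairs, hrest⟩ := pvSplit st.length _ hok
      have hlendrop : kv.length - i = seg.length + 1 + rest.length := by
        have hc := congrArg List.length hsplit
        simp [List.length_drop] at hc
        omega
      have hi : i < kv.length := by omega
      have hdropnext : kv.drop (i + seg.length + 1) = rest := by
        have hd : List.drop (seg.length + 1) (List.drop i kv)
            = List.drop (i + (seg.length + 1)) kv := List.drop_drop
        have he : i + seg.length + 1 = i + (seg.length + 1) := by omega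
        rw [he, ← hd, hsplit]
        have h2 : seg ++ 0 :: rest = (seg ++ [0]) ++ rest := by simp
        have h3 : (seg ++ [0]).length = seg.length + 1 := by simp
        rw [h2, ← h3, List.drop_left]
      match fuel, hfuel with
      | fuel + 1, hfuel =>
        rw [pvOuterA, dif_pos hi,
          pvSegsB_run kv st.length seg i rest (kv.length + 1) hsplit hpairs
            (by omega),
          pvEmitB]
        simp only [pvInnerA_run kv st seg (kv.length + 1) i PySem.Dict.empty rest
          hsplit hpairs (by omega), pvSegDictB_eq]
        exact ih (i + seg.length + 1) (by omega)
          (by rw [hdropnext]; exact hrest) fuel (node + 1) _ (by omega)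

-- ===== VERDICT (by name: the statement is the Claim_ definition above) =====
theorem parse_dense_tags_spec : Claim_equal_parse_dense_tags := by
  intro kv st hdom hpre
  have hok : kv.drop 0 = [] ∨ pvOkG st.length (kv.drop 0) = true := by
    simpa [Pre_parse_dense_tags] using hpre
  unfold Spec_parse_dense_tags parse_dense_tags parse_dense_tags_alt
  exact pvMainLoop kv st (kv.length + 1) 0 (by omega) hok (kv.length + 1) 0 []
    (by omega)
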